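-- pv_equiv track=rewrite | github.com/nyanpiggle/rubiks-cube-solver | utils.py | copy_column
-- ===== SOURCE A (Python) =====
-- def copy_column(matrixA, A, matrixB, colB, last_row=False, reverse=False):
-- 	#copy rowA of matrixA to colB of matrixB
-- 	if last_row:
-- 		for i in range(len(matrixA[A-1])):
-- 			if not reverse: # copy row
-- 				matrixB[i][colB-1] = matrixA[A-1][i]
-- 			else: # copy row reversed
-- 				matrixB[len(matrixA[A-1])-i-1][colB-1] = matrixA[A-1][i]
-- 	# copy matrixA column to matrixB column
-- 	else:
-- 		for i in range(len(matrixA)):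
-- 			if not reverse: # copy column
-- 				matrixB[i][colB-1] = matrixA[i][A-1]
-- 			else: # copy column reversed
-- 				matrixB[i][colB-1] = matrixA[len(matrixA)-i-1][A-1]
-- 	return matrixB
-- ===== SOURCE B (Python) =====
-- def copy_column(matrixA, A, matrixB, colB, last_row=False, reverse=False):
--     # non-mutating rebuild: extract the source values, then cons-build a fresh
--     # matrix by consuming (rows of matrixB, source values) pairwise, with no
--     # index arithmetic; return-value equivalent to A (matrixB is NOT mutated)
--     if last_row:
--         src = matrixA[A - 1]
--     else:
--         src = [row[A - 1] for row in matrixA]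
--     if reverse:
--         src = src[::-1]
--     out = []
--     rows = matrixB
--     vals = src
--     while vals:
--         nr = rows[0][:]
--         nr[colB - 1] = vals[0]
--         out.append(nr)
--         rows = rows[1:]
--         vals = vals[1:]
--     return out + list(rows)
-- ===== Notes on version B (the rewrite author's own statement) =====
-- stated objective: alternative
-- what changed: A writes into matrixB in place with four branches of index arithmetic (including reversed target indices); B instead extracts the source values and cons-builds a brand-new matrix by consuming matrixB's rows and the source pairwise with no index arithmetic, appending the untouched tail rows; it never mutates matrixB.
import Mathlib
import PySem

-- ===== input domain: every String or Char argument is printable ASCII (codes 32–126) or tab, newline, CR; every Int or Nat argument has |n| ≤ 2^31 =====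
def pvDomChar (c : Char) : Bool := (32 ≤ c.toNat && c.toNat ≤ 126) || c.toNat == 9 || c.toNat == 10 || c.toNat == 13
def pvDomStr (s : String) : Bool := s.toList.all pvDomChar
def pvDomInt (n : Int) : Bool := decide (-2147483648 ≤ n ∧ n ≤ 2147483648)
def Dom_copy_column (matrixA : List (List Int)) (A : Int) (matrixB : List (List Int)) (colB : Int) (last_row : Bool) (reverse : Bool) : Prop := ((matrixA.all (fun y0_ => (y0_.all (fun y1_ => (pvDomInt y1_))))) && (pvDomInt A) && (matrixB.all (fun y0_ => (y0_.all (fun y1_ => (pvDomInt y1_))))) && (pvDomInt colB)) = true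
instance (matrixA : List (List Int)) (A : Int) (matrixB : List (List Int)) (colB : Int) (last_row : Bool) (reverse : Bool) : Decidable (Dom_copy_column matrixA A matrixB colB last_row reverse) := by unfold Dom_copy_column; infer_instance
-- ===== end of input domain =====

-- B replaces A's in-place indexed writes (four branches of index arithmetic) by a non-mutating
-- cons-build consuming matrixB's rows and the extracted source pairwise (objective: alternative).
-- Python A mutates matrixB in place; B does not — the equivalence proved here is about the RETURN value.

-- ===== PORT A =====
def copy_column (matrixA : List (List Int)) (A : Int) (matrixB : List (List Int)) (colB : Int) (last_row : Bool) (reverse : Bool) : List (List Int) :=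
  if last_row then
    (List.range (PySem.List.pyGetD matrixA (A-1) []).length).foldl
      (fun mB i =>
        if !reverse then
          mB.set i (PySem.List.pySetD (mB.getD i []) (colB-1) ((PySem.List.pyGetD matrixA (A-1) []).getD i 0))
        else
          mB.set ((PySem.List.pyGetD matrixA (A-1) []).length - i - 1)
            (PySem.List.pySetD (mB.getD ((PySem.List.pyGetD matrixA (A-1) []).length - i - 1) []) (colB-1)
              ((PySem.List.pyGetD matrixA (A-1) []).getD i 0)))
      matrixB
  else
    (List.range matrixA.length).foldl
      (fun mB i =>
        if !reverse then
          mB.set i (PySem.List.pySetD (mB.getD i []) (colB-1) (PySem.List.pyGetD (matrixA.getD i []) (A-1) 0))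
        else
          mB.set i (PySem.List.pySetD (mB.getD i []) (colB-1) (PySem.List.pyGetD (matrixA.getD (matrixA.length - i - 1) []) (A-1) 0)))
      matrixB

-- ===== PORT B =====
-- the while loop of Source B: consume (rows, vals) pairwise, appending fresh rows to the accumulator;
-- the rows=[]/vals≠[] case is Python's IndexError on rows[0] (unreached inside Pre_)
def pvPaint (out : List (List Int)) (rows : List (List Int)) (vals : List Int) (c : Int) : List (List Int) :=
  match vals, rows with
  | [], _ => out ++ rows
  | v :: vs, r :: rs => pvPaint (out ++ [PySem.List.pySetD r c v]) rs vs c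
  | _ :: _, [] => out

def copy_column_alt (matrixA : List (List Int)) (A : Int) (matrixB : List (List Int)) (colB : Int) (last_row : Bool) (reverse : Bool) : List (List Int) :=
  let src0 := if last_row then PySem.List.pyGetD matrixA (A-1) []
              else matrixA.map (fun row => PySem.List.pyGetD row (A-1) 0)
  let src := if reverse then src0.reverse else src0
  pvPaint [] matrixB src (colB-1)

-- ===== PRECONDITION & SPEC =====
-- Pre_ = exactly the inputs on which the Python A returns (no IndexError): the source row/column indices and
-- the written cells matrixB[j][colB-1] (Python negative indexing allowed) are all in range.
def Pre_copy_column (matrixA : List (List Int)) (A : Int) (matrixB : List (List Int)) (colB : Int) (last_row : Bool) (reverse : Bool) : Prop :=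
  if last_row then
    PySem.Raise.InRange matrixA.length (A-1) ∧
    (PySem.List.pyGetD matrixA (A-1) ([] : List Int)).length ≤ matrixB.length ∧
    ∀ j < (PySem.List.pyGetD matrixA (A-1) ([] : List Int)).length,
      PySem.Raise.InRange (matrixB.getD j []).length (colB-1)
  else
    matrixA.length ≤ matrixB.length ∧
    ∀ j < matrixA.length,
      PySem.Raise.InRange (matrixA.getD j []).length (A-1) ∧
      PySem.Raise.InRange (matrixB.getD j []).length (colB-1)
instance (matrixA : List (List Int)) (A : Int) (matrixB : List (List Int)) (colB : Int) (last_row : Bool) (reverse : Bool) : Decidable (Pre_copy_column matrixA A matrixB colB last_row reverse) := by unfold Pre_copy_column; infer_instance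

def pvWitness_copy_column : List (List Int) × Int × List (List Int) × Int × Bool × Bool := ([[1, 2], [3, 4]], 1, [[5, 6], [7, 8]], 2, false, false)

def Spec_copy_column (matrixA : List (List Int)) (A : Int) (matrixB : List (List Int)) (colB : Int) (last_row : Bool) (reverse : Bool) (out : List (List Int)) : Prop := out = copy_column_alt matrixA A matrixB colB last_row reverse
instance (matrixA : List (List Int)) (A : Int) (matrixB : List (List Int)) (colB : Int) (last_row : Bool) (reverse : Bool) (out : List (List Int)) : Decidable (Spec_copy_column matrixA A matrixB colB last_row reverse out) := by unfold Spec_copy_column; infer_instance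

-- ===== CLAIM (what is proved, stated in full; the proofs are below) =====
def Claim_equal_copy_column : Prop := ∀ (matrixA : List (List Int)) (A : Int) (matrixB : List (List Int)) (colB : Int) (last_row : Bool) (reverse : Bool), Dom_copy_column matrixA A matrixB colB last_row reverse → Pre_copy_column matrixA A matrixB colB last_row reverse → Spec_copy_column matrixA A matrixB colB last_row reverse (copy_column matrixA A matrixB colB last_row reverse)

-- ===== LEMMAS AND PROOFS =====

-- accumulator-free form of pvPaint, used only by the proofs
def pvPaint0 (rows : List (List Int)) (vals : List Int) (c : Int) : List (List Int) :=
  match vals, rows with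
  | [], _ => rows
  | v :: vs, r :: rs => PySem.List.pySetD r c v :: pvPaint0 rs vs c
  | _ :: _, [] => []

lemma pvPaint_acc (c : Int) : ∀ (vals : List Int) (rows out : List (List Int)),
    pvPaint out rows vals c = out ++ pvPaint0 rows vals c := by
  intro vals
  induction vals with
  | nil => intro rows out; cases rows <;> rfl
  | cons v vs ih =>
    intro rows out
    cases rows with
    | nil => simp [pvPaint, pvPaint0]
    | cons r rs => rw [pvPaint, pvPaint0, ih, List.append_assoc]; rfl

lemma pvPaint0_length (c : Int) : ∀ (vals : List Int) (rows : List (List Int)),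
    vals.length ≤ rows.length → (pvPaint0 rows vals c).length = rows.length := by
  intro vals
  induction vals with
  | nil => intro rows _; cases rows <;> rfl
  | cons v vs ih =>
    intro rows h
    cases rows with
    | nil => simp at h
    | cons r rs =>
      show (PySem.List.pySetD r c v :: pvPaint0 rs vs c).length = _
      simp only [List.length_cons] at h ⊢
      rw [ih rs (by omega)]

lemma pvPaint0_getD (c : Int) : ∀ (vals : List Int) (rows : List (List Int)) (j : Nat),
    vals.length ≤ rows.length →
    (pvPaint0 rows vals c).getD j []
      = if j < vals.length then PySem.List.pySetD (rows.getD j []) c (vals.getD j 0) else rows.getD j [] := by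
  intro vals
  induction vals with
  | nil => intro rows j _; cases rows <;> simp [pvPaint0]
  | cons v vs ih =>
    intro rows j h
    cases rows with
    | nil => simp at h
    | cons r rs =>
      show (PySem.List.pySetD r c v :: pvPaint0 rs vs c).getD j [] = _
      cases j with
      | zero => simp
      | succ j =>
        simp only [List.getD_cons_succ, List.length_cons]
        rw [ih rs j (by simpa using h)]
        by_cases h2 : j < vs.length
        · rw [if_pos h2, if_pos (by omega)]
        · rw [if_neg h2, if_neg (by omega)]

lemma pySetD_nil (c : Int) (v : Int) : PySem.List.pySetD ([] : List Int) c v = [] := by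
  simp only [PySem.List.pySetD, PySem.List.pySet?]
  cases h : PySem.List.pyIdx? ([] : List Int).length c <;> simp [List.set_nil]

lemma length_fold_set {ι : Type} (l : List ι) (idx : ι → Nat) (val : List (List Int) → ι → List Int) :
    ∀ mB : List (List Int), (l.foldl (fun m x => m.set (idx x) (val m x)) mB).length = mB.length := by
  induction l with
  | nil => intro mB; rfl
  | cons a t ih => intro mB; rw [List.foldl_cons, ih]; exact List.length_set

lemma getD_set_ne (xs : List (List Int)) (n j : Nat) (y : List Int) (h : j ≠ n) :
    (xs.set n y).getD j [] = xs.getD j [] := by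
  simp only [List.getD_eq_getElem?_getD, List.getElem?_set]
  rw [if_neg (by omega)]

lemma getD_set_self_or (xs : List (List Int)) (n : Nat) (y : List Int) :
    (xs.set n y).getD n [] = if n < xs.length then y else xs.getD n [] := by
  simp only [List.getD_eq_getElem?_getD, List.getElem?_set, if_true]
  by_cases h : n < xs.length
  · rw [if_pos h, if_pos h]; rfl
  · rw [if_neg h, List.getElem?_eq_none (by omega), if_neg h]

lemma getD_default (xs : List (List Int)) (n : Nat) (h : xs.length ≤ n) : xs.getD n [] = [] := by
  rw [List.getD_eq_getElem?_getD, List.getElem?_eq_none (by omega)]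
  rfl

lemma getD_map_pyGet (mA : List (List Int)) (g : List Int → Int) (j : Nat) (h : j < mA.length) :
    (mA.map g).getD j 0 = g (mA.getD j []) := by
  rw [List.getD_eq_getElem?_getD, List.getElem?_map, List.getElem?_eq_getElem h,
      List.getD_eq_getElem _ _ h]
  rfl

lemma getD_rev (s : List Int) (j : Nat) (h : j < s.length) :
    s.reverse.getD j 0 = s.getD (s.length - 1 - j) 0 := by
  rw [List.getD_eq_getElem?_getD, List.getElem?_reverse h, ← List.getD_eq_getElem?_getD]

lemma fold_fwd_getD (c : Int) (v : Nat → Int) :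
    ∀ (n : Nat) (mB : List (List Int)) (j : Nat),
      ((List.range n).foldl (fun m i => m.set i (PySem.List.pySetD (m.getD i []) c (v i))) mB).getD j []
        = if j < n then PySem.List.pySetD (mB.getD j []) c (v j) else mB.getD j [] := by
  intro n
  induction n with
  | zero => simp
  | succ n ih =>
    intro mB j
    rw [List.range_succ, List.foldl_append, List.foldl_cons, List.foldl_nil]
    have hlen : ((List.range n).foldl (fun m i => m.set i (PySem.List.pySetD (m.getD i []) c (v i))) mB).length = mB.length :=
      length_fold_set (List.range n) (fun i => i) _ mB
    have hFn : ((List.range n).foldl (fun m i => m.set i (PySem.List.pySetD (m.getD i []) c (v i))) mB).getD n [] = mB.getD n [] := by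
      rw [ih]; simp
    by_cases hj : j = n
    · subst hj
      rw [getD_set_self_or, hlen, hFn]
      by_cases hb : j < mB.length
      · rw [if_pos hb, if_pos (by omega)]
      · rw [if_neg hb, if_pos (by omega), getD_default mB j (by omega), pySetD_nil]
    · rw [getD_set_ne _ _ _ _ hj, ih]
      by_cases h2 : j < n
      · rw [if_pos h2, if_pos (by omega)]
      · rw [if_neg h2, if_neg (by omega)]

lemma fold_rev_getD (c : Int) (v : Nat → Int) (N : Nat) :
    ∀ (n : Nat), n ≤ N → ∀ (mB : List (List Int)) (j : Nat),
      ((List.range n).foldl (fun m i => m.set (N - i - 1) (PySem.List.pySetD (m.getD (N - i - 1) []) c (v i))) mB).getD j []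
        = if N - n ≤ j ∧ j < N then PySem.List.pySetD (mB.getD j []) c (v (N - j - 1)) else mB.getD j [] := by
  intro n
  induction n with
  | zero => intro _ mB j; rw [List.range_zero, List.foldl_nil, if_neg (by omega)]
  | succ n ih =>
    intro hn mB j
    rw [List.range_succ, List.foldl_append, List.foldl_cons, List.foldl_nil]
    have hlen : ((List.range n).foldl (fun m i => m.set (N - i - 1) (PySem.List.pySetD (m.getD (N - i - 1) []) c (v i))) mB).length = mB.length :=
      length_fold_set (List.range n) (fun i => N - i - 1) _ mB
    have hFn : ((List.range n).foldl (fun m i => m.set (N - i - 1) (PySem.List.pySetD (m.getD (N - i - 1) []) c (v i))) mB).getD (N - n - 1) [] = mB.getD (N - n - 1) [] := by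
      rw [ih (by omega), if_neg (by omega)]
    by_cases hj : j = N - n - 1
    · subst hj
      rw [getD_set_self_or, hlen, hFn]
      by_cases hb : N - n - 1 < mB.length
      · rw [if_pos hb, if_pos (by omega), show N - (N - n - 1) - 1 = n by omega]
      · rw [if_neg hb, if_pos (by omega), getD_default mB (N - n - 1) (by omega), pySetD_nil]
    · rw [getD_set_ne _ _ _ _ hj, ih (by omega)]
      by_cases h2 : N - n ≤ j ∧ j < N
      · rw [if_pos h2, if_pos (by omega)]
      · rw [if_neg h2, if_neg (by omega)]

lemma ext_getD (xs ys : List (List Int)) (hl : xs.length = ys.length)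
    (h : ∀ j, xs.getD j [] = ys.getD j []) : xs = ys := by
  apply List.ext_getElem hl
  intro i h1 h2
  have := h i
  rwa [List.getD_eq_getElem _ _ h1, List.getD_eq_getElem _ _ h2] at this

-- ===== VERDICT (by name: the statement is the Claim_ definition above) =====
theorem copy_column_spec : Claim_equal_copy_column := by
  intro mA A mB colB lr rv _hDom hPre
  unfold Pre_copy_column at hPre
  unfold Spec_copy_column copy_column copy_column_alt
  cases lr <;> cases rv <;>
    simp only [Bool.not_false, Bool.not_true, Bool.false_eq_true, Bool.true_eq_false,
      if_false, if_true, Bool.false_eq_true, reduceIte] at hPre ⊢ <;>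
    rw [pvPaint_acc, List.nil_append]
  · -- last_row = false, reverse = false
    obtain ⟨hlen, -⟩ := hPre
    have hs : (mA.map (fun row => PySem.List.pyGetD row (A-1) 0)).length ≤ mB.length := by
      simpa using hlen
    apply ext_getD
    · rw [length_fold_set, pvPaint0_length _ _ _ hs]
    · intro j
      rw [fold_fwd_getD, pvPaint0_getD _ _ _ _ hs, List.length_map]
      by_cases hj : j < mA.length
      · rw [if_pos hj, if_pos hj, getD_map_pyGet _ _ _ hj]
      · rw [if_neg hj, if_neg hj]
  · -- last_row = false, reverse = true
    obtain ⟨hlen, -⟩ := hPre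
    have hs : (mA.map (fun row => PySem.List.pyGetD row (A-1) 0)).reverse.length ≤ mB.length := by
      simpa using hlen
    apply ext_getD
    · rw [length_fold_set, pvPaint0_length _ _ _ hs]
    · intro j
      rw [fold_fwd_getD, pvPaint0_getD _ _ _ _ hs, List.length_reverse, List.length_map]
      by_cases hj : j < mA.length
      · rw [if_pos hj, if_pos hj,
            getD_rev _ _ (by simpa using hj), List.length_map,
            getD_map_pyGet _ _ _ (by omega),
            show mA.length - j - 1 = mA.length - 1 - j by omega]
      · rw [if_neg hj, if_neg hj]
  · -- last_row = true, reverse = false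
    obtain ⟨-, hlen, -⟩ := hPre
    apply ext_getD
    · rw [length_fold_set, pvPaint0_length _ _ _ hlen]
    · intro j
      rw [fold_fwd_getD, pvPaint0_getD _ _ _ _ hlen]
  · -- last_row = true, reverse = true
    obtain ⟨-, hlen, -⟩ := hPre
    have hs : (PySem.List.pyGetD mA (A-1) ([] : List Int)).reverse.length ≤ mB.length := by
      simpa using hlen
    apply ext_getD
    · rw [length_fold_set, pvPaint0_length _ _ _ hs]
    · intro j
      rw [fold_rev_getD _ _ _ _ le_rfl, pvPaint0_getD _ _ _ _ hs, List.length_reverse]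
      by_cases hj : j < (PySem.List.pyGetD mA (A-1) ([] : List Int)).length
      · rw [if_pos (by omega), if_pos hj,
            getD_rev _ _ hj,
            show (PySem.List.pyGetD mA (A-1) ([] : List Int)).length - j - 1
               = (PySem.List.pyGetD mA (A-1) ([] : List Int)).length - 1 - j by omega]
      · rw [if_neg (by omega), if_neg hj]
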